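-- pv_equiv track=rewrite | github.com/whitem4rk/2023-algorithm-study | LEVEL 1/weapon.py | solution
-- ===== SOURCE A (Python) =====
-- def solution(number, limit, power):
--     answer = 0
--     cntlist = [0] * (number+1)
--     for i in range(1, number+1):
--         for j in range(i, number+1, i):
--             cntlist[j] += 1
--
--     for cnt in cntlist:
--         if cnt > limit:
--             answer += power
--         else:
--             answer += cnt
--
--     return answer
-- ===== SOURCE B (Python) =====
-- def solution(number, limit, power):
--     # sqrt-pairing sieve: only divisors d <= sqrt(m) are enumerated; each such d
--     # contributes 2 to every multiple m > d*d (for the pair d, m//d) and 1 to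
--     # m = d*d, instead of A's full multiples sieve over every i in 1..number.
--     cnt = [0] * (number + 1)
--     d = 1
--     while d * d <= number:
--         cnt[d * d] += 1
--         for m in range(d * d + d, number + 1, d):
--             cnt[m] += 2
--         d += 1
--     answer = 0
--     for c in cnt:
--         answer += power if c > limit else c
--     return answer
-- ===== Notes on version B (the rewrite author's own statement) =====
-- stated objective: faster
-- what changed: Replaces A's full multiples sieve (every i in 1..number bumps each of its multiples, then a capping pass) with a sqrt-pairing sieve: only d with d*d <= number are enumerated, each adding 2 to every multiple beyond d*d (for the divisor pair d, m//d) and 1 to the square d*d, accumulated by the same capping pass.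
import Mathlib
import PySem

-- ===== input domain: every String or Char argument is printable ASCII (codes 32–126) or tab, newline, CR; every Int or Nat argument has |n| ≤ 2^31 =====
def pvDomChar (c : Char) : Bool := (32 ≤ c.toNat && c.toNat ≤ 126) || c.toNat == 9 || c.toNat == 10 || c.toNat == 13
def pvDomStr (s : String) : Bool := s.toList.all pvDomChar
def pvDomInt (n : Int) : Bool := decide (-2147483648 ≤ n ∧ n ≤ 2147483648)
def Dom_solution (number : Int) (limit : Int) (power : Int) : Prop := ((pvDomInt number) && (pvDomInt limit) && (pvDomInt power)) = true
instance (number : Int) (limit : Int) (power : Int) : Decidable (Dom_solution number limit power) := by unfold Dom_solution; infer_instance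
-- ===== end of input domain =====

-- B replaces A's full multiples sieve (every i in 1..number bumps all its multiples)
-- with a sqrt-pairing sieve (only d with d*d <= number, adding 2 per divisor pair and
-- 1 per perfect square); objective: alternative (measurably lower constant), same values.


-- ===== PORT A =====
-- Python's mutable list is ported as Array (O(1) in-place update, like Python's list);
-- every index j written by the sieve satisfies 1 ≤ j < len(cntlist), so set!/getD at j.toNat is exact
def solution (number : Int) (limit : Int) (power : Int) : Int :=
  let cnt0 : Array Int := Array.replicate (number + 1).toNat 0
  let cntlist : Array Int :=
    (PySem.List.pyRange 1 (number + 1) 1).foldl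
      (fun cl i =>
        (PySem.List.pyRange i (number + 1) i).foldl
          (fun cl j => cl.set! j.toNat (cl.getD j.toNat 0 + 1)) cl)
      cnt0
  cntlist.foldl (fun answer cnt => if cnt > limit then answer + power else answer + cnt) 0

-- ===== PORT B =====
-- Source B's 'while d*d <= number' loop, as a recursion on d (d*d <= number forces d <= number);
-- every index written satisfies 1 ≤ index ≤ number, so set!/getD at .toNat is exact
def altLoop (number : Int) (d : Int) (cnt : Array Int) : Array Int :=
  if d * d ≤ number then
    altLoop number (d + 1)
      ((PySem.List.pyRange (d * d + d) (number + 1) d).foldl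
        (fun cl m => cl.set! m.toNat (cl.getD m.toNat 0 + 2))
        (cnt.set! (d * d).toNat (cnt.getD (d * d).toNat 0 + 1)))
  else cnt
termination_by (number + 1 - d).toNat
decreasing_by
  have : d ≤ number := by nlinarith [sq_nonneg d, sq_nonneg (d - 1)]
  omega

def solution_alt (number : Int) (limit : Int) (power : Int) : Int :=
  let cnt := altLoop number 1 (Array.replicate (number + 1).toNat 0)
  cnt.foldl (fun answer c => if c > limit then answer + power else answer + c) 0

-- ===== PRECONDITION & SPEC =====
def Spec_solution (number : Int) (limit : Int) (power : Int) (out : Int) : Prop := out = solution_alt number limit power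
instance (number : Int) (limit : Int) (power : Int) (out : Int) : Decidable (Spec_solution number limit power out) := by unfold Spec_solution; infer_instance

-- ===== CLAIM (what is proved, stated in full; the proofs are below) =====
def Claim_equal_solution : Prop := ∀ (number : Int) (limit : Int) (power : Int), Dom_solution number limit power → Spec_solution number limit power (solution number limit power)

-- ===== LEMMAS AND PROOFS =====

-- Array/List bridge for the sieves' in-place updates
theorem pvArr_getD (a : Array Int) (i : Nat) (d : Int) : a.getD i d = a.toList.getD i d := by
  simp [Array.getD, List.getD]
  split
  · next h => simp [Array.getElem?_eq_getElem h]
  · next h => simp [Array.getElem?_eq_none (by omega : a.size ≤ i)]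

theorem pvArr_step (a : Array Int) (j : Int) (w : Int) :
    (a.set! j.toNat (a.getD j.toNat 0 + w)).toList
      = a.toList.set j.toNat (a.toList.getD j.toNat 0 + w) := by
  rw [show a.set! j.toNat (a.getD j.toNat 0 + w)
      = a.setIfInBounds j.toNat (a.getD j.toNat 0 + w) from rfl,
    Array.toList_setIfInBounds, pvArr_getD]

theorem pvArr_inner (w : Int) (js : List Int) (a : Array Int) :
    (js.foldl (fun cl j => cl.set! j.toNat (cl.getD j.toNat 0 + w)) a).toList
      = js.foldl (fun cl j => cl.set j.toNat (cl.getD j.toNat 0 + w)) a.toList := by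
  induction js generalizing a with
  | nil => rfl
  | cons j js ih => rw [List.foldl_cons, List.foldl_cons, ih, pvArr_step]

theorem pvArr_outer (is : List Int) (g : Int → List Int) (a : Array Int) :
    (is.foldl (fun cl i => (g i).foldl (fun cl j => cl.set! j.toNat (cl.getD j.toNat 0 + 1)) cl) a).toList
      = is.foldl (fun cl i => (g i).foldl (fun cl j => cl.set j.toNat (cl.getD j.toNat 0 + 1)) cl) a.toList := by
  induction is generalizing a with
  | nil => rfl
  | cons i is ih => rw [List.foldl_cons, List.foldl_cons, ih, pvArr_inner]

-- a fold of in-range "+w" updates preserves length and adds w per occurrence of the slot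
theorem pvBump_foldl_length (w : Int) (js : List Int) (l : List Int) :
    (js.foldl (fun cl j => cl.set j.toNat (cl.getD j.toNat 0 + w)) l).length = l.length := by
  induction js generalizing l with
  | nil => rfl
  | cons j js ih => rw [List.foldl_cons, ih, List.length_set]

theorem pvBump_foldl_getD (w : Int) (js : List Int) (l : List Int) (t : Nat)
    (ht : t < l.length) (hjs : ∀ j ∈ js, 0 ≤ j) :
    (js.foldl (fun cl j => cl.set j.toNat (cl.getD j.toNat 0 + w)) l).getD t 0
      = l.getD t 0 + w * (js.count ((t : Int)) : Int) := by
  induction js generalizing l with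
  | nil => simp
  | cons j js ih =>
    have hj : 0 ≤ j := hjs j (by simp)
    have hrest : ∀ x ∈ js, 0 ≤ x := fun x hx => hjs x (by simp [hx])
    rw [List.foldl_cons, ih _ (by simpa [List.length_set] using ht) hrest,
        List.count_cons]
    by_cases hjt : j = (t : Int)
    · have hjn : j.toNat = t := by omega
      rw [List.getD_eq_getElem _ _ (by simpa using ht),
          List.getD_eq_getElem _ _ ht, hjn,
          List.getElem_set_self (by simpa using ht)]
      rw [List.getD_eq_getElem _ _ ht]
      simp [hjt]
      ring
    · have hne : j.toNat ≠ t := by omega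
      rw [List.getD_eq_getElem _ _ (by simpa using ht),
          List.getD_eq_getElem _ _ ht,
          List.getElem_set_ne hne (by simpa using ht)]
      simp [hjt, List.getD_eq_getElem _ _ ht]

-- count of t in range(a, b, s) for a positive step
theorem pvCount_stride (a b s t : Int) (hs : 1 ≤ s) :
    ((PySem.List.pyRange a b s).count t : Int)
      = if a ≤ t ∧ t < b ∧ s ∣ t - a then 1 else 0 := by
  have hpos : (0 : Int) < s := by omega
  have hnodup : (PySem.List.pyRange a b s).Nodup := by
    rw [PySem.List.pyRange_of_pos _ _ hpos]
    refine (List.nodup_range).map ?_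
    intro x y h
    have h2 : s * (x : Int) = s * (y : Int) := by linarith
    have h3 : ((x : Int)) = (y : Int) := mul_left_cancel₀ (by omega) h2
    exact_mod_cast h3
  by_cases hm : t ∈ PySem.List.pyRange a b s
  · rw [if_pos ((PySem.List.mem_pyRange_iff_of_pos hpos t).mp hm),
      List.count_eq_one_of_mem hnodup hm]
    norm_num
  · rw [if_neg (fun h => hm ((PySem.List.mem_pyRange_iff_of_pos hpos t).mpr h)),
      List.count_eq_zero_of_not_mem hm]
    norm_num

-- A's inner range: count of t in range(i, number+1, i)
theorem pvCount_multiples (i b t : Int) (hi : 1 ≤ i) :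
    ((PySem.List.pyRange i b i).count t : Int)
      = if i ≤ t ∧ t < b ∧ i ∣ t then 1 else 0 := by
  have hiff : (i ∣ t - i) ↔ (i ∣ t) := by
    constructor
    · intro h; simpa using dvd_add h (dvd_refl i)
    · intro h; exact dvd_sub h (dvd_refl i)
  rw [pvCount_stride i b i t hi]
  simp only [hiff]

-- B's inner range: count of t in range(d*d+d, b, d)
theorem pvCount_pairs (d b t : Int) (hd : 1 ≤ d) :
    ((PySem.List.pyRange (d * d + d) b d).count t : Int)
      = if d ∣ t ∧ d * d < t ∧ t < b then 1 else 0 := by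
  have hiff : (d * d + d ≤ t ∧ t < b ∧ d ∣ t - (d * d + d))
      ↔ (d ∣ t ∧ d * d < t ∧ t < b) := by
    constructor
    · rintro ⟨h1, h2, h3⟩
      refine ⟨?_, by omega, h2⟩
      have : d ∣ (t - (d * d + d)) + (d * d + d) := by
        exact dvd_add h3 ⟨d + 1, by ring⟩
      simpa using this
    · rintro ⟨h1, h2, h3⟩
      have hdvd2 : d ∣ t - d * d := by
        exact dvd_sub h1 ⟨d, rfl⟩
      have hpos : 0 < t - d * d := by omega
      have hge : d ≤ t - d * d := Int.le_of_dvd hpos hdvd2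
      exact ⟨by omega, h3, by
        have : d ∣ (t - d * d) - d := dvd_sub hdvd2 (dvd_refl d)
        simpa [sub_sub] using this⟩
  rw [pvCount_stride (d * d + d) b d t hd]
  simp only [hiff]

-- a 0/1-valued Int sum over a list is a countP
theorem pvSum_ite (l : List Int) (P : Int → Prop) [DecidablePred P] :
    (l.map (fun i => if P i then (1 : Int) else 0)).sum
      = ((l.countP (fun i => decide (P i))) : Int) := by
  induction l with
  | nil => simp
  | cons x l ih =>
    simp [List.countP_cons, ih]
    by_cases h : P x <;> simp [h] <;> ring

-- cast of a sum of counts, elementwise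
theorem pvCast_sum (t : Int) (f : Int → List Int) (l : List Int) :
    (((l.map f).map (List.count t)).sum : Int)
      = (l.map (fun i => (((f i).count t) : Int))).sum := by
  induction l with
  | nil => rfl
  | cons x l ih =>
    simp only [List.map_cons, List.sum_cons]
    push_cast [← ih]
    ring

-- the A-sieve slot t holds the number of i in range(1, number+1) with i ≤ t, t ≤ number, i ∣ t
theorem pvSieve_getD (number : Int) (t : Nat)
    (ht : t < (number + 1).toNat) :
    ((PySem.List.pyRange 1 (number + 1) 1).foldl
      (fun cl i =>
        (PySem.List.pyRange i (number + 1) i).foldl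
          (fun cl j => cl.set j.toNat (cl.getD j.toNat 0 + 1)) cl)
      (List.replicate (number + 1).toNat (0 : Int))).getD t 0
    = (((PySem.List.pyRange 1 (number + 1) 1).countP
        (fun i => decide (i ≤ (t : Int) ∧ (t : Int) < number + 1 ∧ i ∣ (t : Int)))) : Int) := by
  rw [show (PySem.List.pyRange 1 (number + 1) 1).foldl
      (fun cl i =>
        (PySem.List.pyRange i (number + 1) i).foldl
          (fun cl j => cl.set j.toNat (cl.getD j.toNat 0 + 1)) cl)
      (List.replicate (number + 1).toNat (0 : Int))
    = (((PySem.List.pyRange 1 (number + 1) 1).map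
          (fun i => PySem.List.pyRange i (number + 1) i)).flatten).foldl
        (fun cl j => cl.set j.toNat (cl.getD j.toNat 0 + 1))
        (List.replicate (number + 1).toNat (0 : Int)) from by
      rw [List.foldl_flatten, List.foldl_map]]
  rw [pvBump_foldl_getD 1 _ _ t (by simpa using ht) ?nonneg]
  case nonneg =>
    intro j hj
    simp only [List.mem_flatten, List.mem_map] at hj
    obtain ⟨l, ⟨i, hi, rfl⟩, hjl⟩ := hj
    have hi1 : 1 ≤ i := (PySem.List.mem_pyRange_one.mp hi).1
    have := (PySem.List.mem_pyRange_iff_of_pos (by omega) j).mp hjl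
    omega
  rw [List.getD_replicate _ ht, List.count_flatten]
  rw [pvCast_sum ((t : Int)) (fun i => PySem.List.pyRange i (number + 1) i)]
  rw [List.map_congr_left (fun i hi => by
    exact pvCount_multiples i (number + 1) (t : Int) (PySem.List.mem_pyRange_one.mp hi).1)]
  rw [pvSum_ite]
  simp

-- splitting a countP along a pointwise-weaker predicate
theorem pvCountP_split (l : List Int) (p q : Int → Bool)
    (h : ∀ e ∈ l, q e = true → p e = true) :
    l.countP p = l.countP q + l.countP (fun e => p e && !q e) := by
  induction l with
  | nil => rfl
  | cons x l ih =>
    have hx := h x (by simp)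
    have hrest : ∀ e ∈ l, q e = true → p e = true := fun e he => h e (by simp [he])
    simp only [List.countP_cons, ih hrest]
    cases hq : q x <;> cases hp : p x <;> simp [hq, hp] at hx ⊢ <;> omega

-- a two-element predicate counts each element once
theorem pvCountP_pair (l : List Int) (a b : Int) (hab : a ≠ b) :
    l.countP (fun e => e == a || e == b) = l.count a + l.count b := by
  induction l with
  | nil => rfl
  | cons x l ih =>
    simp only [List.countP_cons, List.count_cons, ih]
    by_cases hxa : x = a <;> by_cases hxb : x = b <;> subst_vars <;>
      simp_all <;> omega

-- peeling the bound d off a 'p e ∧ d ≤ e' count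
theorem pvCountP_shift (R : List Int) (hR : R.Nodup) (p : Int → Bool) (d : Int)
    (hmem : p d = true → d ∈ R) :
    R.countP (fun e => p e && decide (d ≤ e))
      = R.countP (fun e => p e && decide (d + 1 ≤ e)) + if p d then 1 else 0 := by
  have hsub : ∀ e ∈ R, (p e && decide (d + 1 ≤ e)) = true →
      (p e && decide (d ≤ e)) = true := by
    intro e _ h
    simp only [Bool.and_eq_true, decide_eq_true_eq] at h ⊢
    exact ⟨h.1, by omega⟩
  rw [pvCountP_split R _ _ hsub]
  congr 1
  by_cases hpd : p d = true
  · have hcong : ∀ e ∈ R,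
        ((p e && decide (d ≤ e)) && !(p e && decide (d + 1 ≤ e))) = true
          ↔ ((e == d) = true) := by
      intro e _
      simp only [Bool.and_eq_true, Bool.not_and, Bool.or_eq_true, Bool.not_eq_eq_eq_not,
        Bool.not_true, decide_eq_true_eq, decide_eq_false_iff_not, beq_iff_eq,
        Bool.and_eq_true, Bool.not_eq_true']
      constructor
      · rintro ⟨⟨hpe, hde⟩, h | h⟩
        · exact absurd hpe (by simp [h])
        · omega
      · intro h
        subst h
        exact ⟨⟨hpd, by omega⟩, Or.inr (by simp)⟩
    rw [List.countP_congr hcong, if_pos hpd]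
    exact List.count_eq_one_of_mem hR (hmem hpd)
  · have hzero : R.countP
        (fun e => (p e && decide (d ≤ e)) && !(p e && decide (d + 1 ≤ e))) = 0 := by
      rw [List.countP_eq_zero]
      intro e _
      simp only [Bool.and_eq_true, Bool.not_eq_eq_eq_not, Bool.not_true, decide_eq_true_eq]
      rintro ⟨⟨hpe, hde⟩, hq⟩
      rcases Bool.and_eq_false_iff.mp hq with h | h
      · exact absurd hpe (by simp [h])
      · have : ¬ (d + 1 ≤ e) := by simpa using h
        have : e = d := by omega
        subst this
        exact hpd hpe
    rw [hzero, if_neg hpd]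
  
-- remaining divisors of i from trial index d: e ∣ i with d ≤ e and d ≤ i/e
def pvM (i d : Int) : Nat :=
  (PySem.List.pyRange 1 (i + 1) 1).countP (fun e => decide (e ∣ i ∧ d ≤ e ∧ d * e ≤ i))

theorem pvM_sqrt (i d : Int) (hd : 1 ≤ d) (heq : d * d = i) : pvM i d = 1 := by
  unfold pvM
  have hdi : d ≤ i := by nlinarith
  have hcong : ∀ e ∈ PySem.List.pyRange 1 (i + 1) 1,
      (decide (e ∣ i ∧ d ≤ e ∧ d * e ≤ i) = true) ↔ ((e == d) = true) := by
    intro e he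
    have hmem := PySem.List.mem_pyRange_one.mp he
    simp only [decide_eq_true_eq, beq_iff_eq]
    constructor
    · rintro ⟨hdvd2, hde, hprod⟩
      have : e ≤ d := by nlinarith
      omega
    · intro h
      subst h
      exact ⟨⟨e, heq.symm⟩, le_rfl, le_of_eq heq⟩
  rw [List.countP_congr hcong]
  exact List.count_eq_one_of_mem (PySem.List.nodup_pyRange_one _ _)
    (PySem.List.mem_pyRange_one.mpr (by omega))

theorem pvM_gt (i d : Int) (hd : 1 ≤ d) (hgt : i < d * d) : pvM i d = 0 := by
  unfold pvM
  rw [List.countP_eq_zero]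
  intro e he
  have hmem := PySem.List.mem_pyRange_one.mp he
  simp only [decide_eq_true_eq]
  rintro ⟨hdvd, hde, hprod⟩
  nlinarith

theorem pvM_step (i d : Int) (hd : 1 ≤ d) (hlt : d * d < i) :
    (pvM i d : Int) = (if d ∣ i then 2 else 0) + pvM i (d + 1) := by
  have hi : 1 ≤ i := by nlinarith
  have hsub : ∀ e ∈ PySem.List.pyRange 1 (i + 1) 1,
      (decide (e ∣ i ∧ d + 1 ≤ e ∧ (d + 1) * e ≤ i)) = true →
      (decide (e ∣ i ∧ d ≤ e ∧ d * e ≤ i)) = true := by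
    intro e he h
    have hmem := PySem.List.mem_pyRange_one.mp he
    simp only [decide_eq_true_eq] at h ⊢
    obtain ⟨h1, h2, h3⟩ := h
    exact ⟨h1, by omega, by nlinarith⟩
  unfold pvM
  rw [pvCountP_split _ _ _ hsub]
  by_cases hdvd : d ∣ i
  · obtain ⟨k, hk⟩ : ∃ k, d * k = i := ⟨i / d, Int.mul_ediv_cancel' hdvd⟩
    have hdk : d < k := by nlinarith
    have hk1 : 1 ≤ k := by omega
    have hki : k ≤ i := by nlinarith
    have hchar : ∀ e ∈ PySem.List.pyRange 1 (i + 1) 1,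
        ((decide (e ∣ i ∧ d ≤ e ∧ d * e ≤ i) &&
          !decide (e ∣ i ∧ d + 1 ≤ e ∧ (d + 1) * e ≤ i)) = true)
        ↔ ((e == d || e == k) = true) := by
      intro e he
      have hmem := PySem.List.mem_pyRange_one.mp he
      simp only [Bool.and_eq_true, Bool.not_eq_eq_eq_not, Bool.not_true,
        decide_eq_false_iff_not, decide_eq_true_eq, Bool.or_eq_true, beq_iff_eq]
      constructor
      · rintro ⟨⟨hedvd, hde, hprod⟩, hnq⟩
        by_cases hsmall : e ≤ d
        · left; omega
        · right
          have h2 : d + 1 ≤ e := by omega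
          have h3 : i < (d + 1) * e := by
            by_contra hc
            exact hnq ⟨hedvd, h2, by omega⟩
          obtain ⟨c, hc⟩ := hedvd
          have hc1 : d ≤ c := by nlinarith
          have hc2 : c ≤ d := by nlinarith
          have hcd : d = c := le_antisymm hc1 hc2
          subst hcd
          have hde' : d * e = d * k := by rw [hk, hc]; ring
          exact mul_left_cancel₀ (by omega : (d : Int) ≠ 0) hde'
      · intro h
        rcases h with h | h
        · subst h
          exact ⟨⟨hdvd, le_rfl, le_of_lt hlt⟩, fun hq => by omega⟩
        · subst h
          refine ⟨⟨⟨d, by rw [← hk]; ring⟩, by omega, le_of_eq hk⟩, ?_⟩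
          rintro ⟨_, _, h3⟩
          nlinarith
    rw [List.countP_congr hchar, pvCountP_pair _ d k (by omega)]
    rw [List.count_eq_one_of_mem (PySem.List.nodup_pyRange_one _ _)
        (PySem.List.mem_pyRange_one.mpr ⟨by omega, by nlinarith⟩),
      List.count_eq_one_of_mem (PySem.List.nodup_pyRange_one _ _)
        (PySem.List.mem_pyRange_one.mpr ⟨by omega, by omega⟩)]
    rw [if_pos hdvd]
    omega
  · have hzero : (PySem.List.pyRange 1 (i + 1) 1).countP
        (fun e => decide (e ∣ i ∧ d ≤ e ∧ d * e ≤ i) &&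
          !decide (e ∣ i ∧ d + 1 ≤ e ∧ (d + 1) * e ≤ i)) = 0 := by
      rw [List.countP_eq_zero]
      intro e he
      have hmem := PySem.List.mem_pyRange_one.mp he
      simp only [Bool.and_eq_true, Bool.not_eq_eq_eq_not, Bool.not_true,
        decide_eq_false_iff_not, decide_eq_true_eq]
      rintro ⟨⟨hedvd, hde, hprod⟩, hnq⟩
      by_cases hsmall : e ≤ d
      · have : e = d := by omega
        subst this
        exact hdvd hedvd
      · have h2 : d + 1 ≤ e := by omega
        have h3 : i < (d + 1) * e := by
          by_contra hc
          exact hnq ⟨hedvd, h2, by omega⟩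
        obtain ⟨c, hc⟩ := hedvd
        have hc1 : d ≤ c := by nlinarith
        have hc2 : c ≤ d := by nlinarith
        have hcd : d = c := le_antisymm hc1 hc2
        subst hcd
        exact hdvd ⟨e, by rw [hc]; ring⟩
    rw [hzero, if_neg hdvd]
    simp

-- small-divisor and square counts still ahead of trial index d
def pvS (t d : Int) : Nat :=
  (PySem.List.pyRange 1 (t + 1) 1).countP
    (fun e => decide (e ∣ t ∧ e * e < t) && decide (d ≤ e))

def pvQ (t d : Int) : Nat :=
  (PySem.List.pyRange 1 (t + 1) 1).countP
    (fun e => decide (e * e = t) && decide (d ≤ e))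

-- each divisor below the square root pairs with one above it
theorem pvM_pairing : ∀ (n : Nat) (t d : Int), 1 ≤ t → 1 ≤ d → (t - d).toNat = n →
    (pvM t d : Int) = 2 * pvS t d + pvQ t d := by
  intro n
  induction n using Nat.strong_induction_on with
  | _ n ih =>
    intro t d ht hd hn
    by_cases hlt : d * d < t
    · have hdt : d < t := by nlinarith [sq_nonneg d, sq_nonneg (d - 1)]
      have hm : (t - (d + 1)).toNat < n := by omega
      have hSstep : pvS t d = pvS t (d + 1)
          + if (decide (d ∣ t ∧ d * d < t)) = true then 1 else 0 := by
        unfold pvS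
        apply pvCountP_shift _ (PySem.List.nodup_pyRange_one _ _)
        intro hp
        simp only [decide_eq_true_eq] at hp
        exact PySem.List.mem_pyRange_one.mpr ⟨by omega, by omega⟩
      have hQstep : pvQ t d = pvQ t (d + 1)
          + if (decide (d * d = t)) = true then 1 else 0 := by
        unfold pvQ
        apply pvCountP_shift _ (PySem.List.nodup_pyRange_one _ _)
        intro hp
        simp only [decide_eq_true_eq] at hp
        exact PySem.List.mem_pyRange_one.mpr ⟨by omega, by nlinarith⟩
      rw [pvM_step t d hd hlt, ih _ hm t (d + 1) ht (by omega) rfl, hSstep, hQstep]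
      have hne : (decide (d * d = t)) = false := by
        simp only [decide_eq_false_iff_not]
        exact ne_of_lt hlt
      by_cases hdvd : d ∣ t <;>
        simp [hdvd, hlt, hne] <;> push_cast <;> ring
    · by_cases heq : d * d = t
      · have hS0 : pvS t d = 0 := by
          unfold pvS
          rw [List.countP_eq_zero]
          intro e he
          simp only [Bool.and_eq_true, decide_eq_true_eq]
          rintro ⟨⟨_, h2⟩, h3⟩
          nlinarith
        have hQ1 : pvQ t d = 1 := by
          unfold pvQ
          have hcong : ∀ e ∈ PySem.List.pyRange 1 (t + 1) 1,
              ((decide (e * e = t) && decide (d ≤ e)) = true) ↔ ((e == d) = true) := by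
            intro e he
            have hmem := PySem.List.mem_pyRange_one.mp he
            simp only [Bool.and_eq_true, decide_eq_true_eq, beq_iff_eq]
            constructor
            · rintro ⟨h1, h2⟩
              nlinarith
            · intro h
              subst h
              exact ⟨heq, le_rfl⟩
          rw [List.countP_congr hcong]
          exact List.count_eq_one_of_mem (PySem.List.nodup_pyRange_one _ _)
            (PySem.List.mem_pyRange_one.mpr ⟨by omega, by nlinarith⟩)
        rw [pvM_sqrt t d hd heq, hS0, hQ1]
        norm_num
      · have hgt : t < d * d := by omega
        have hS0 : pvS t d = 0 := by
          unfold pvS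
          rw [List.countP_eq_zero]
          intro e he
          simp only [Bool.and_eq_true, decide_eq_true_eq]
          rintro ⟨⟨_, h2⟩, h3⟩
          nlinarith
        have hQ0 : pvQ t d = 0 := by
          unfold pvQ
          rw [List.countP_eq_zero]
          intro e he
          simp only [Bool.and_eq_true, decide_eq_true_eq]
          rintro ⟨h1, h2⟩
          nlinarith
        rw [pvM_gt t d hd hgt, hS0, hQ0]
        norm_num

-- B's loop over the list model
def pvListLoop (number : Int) (d : Int) (l : List Int) : List Int :=
  if d * d ≤ number then
    pvListLoop number (d + 1)
      ((PySem.List.pyRange (d * d + d) (number + 1) d).foldl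
        (fun cl m => cl.set m.toNat (cl.getD m.toNat 0 + 2))
        (l.set (d * d).toNat (l.getD (d * d).toNat 0 + 1)))
  else l
termination_by (number + 1 - d).toNat
decreasing_by
  have : d ≤ number := by nlinarith [sq_nonneg d, sq_nonneg (d - 1)]
  omega

theorem pvLoop_toList : ∀ (n : Nat) (number d : Int) (a : Array Int),
    (number + 1 - d).toNat = n →
    (altLoop number d a).toList = pvListLoop number d a.toList := by
  intro n
  induction n using Nat.strong_induction_on with
  | _ n ih =>
    intro number d a hn
    rw [altLoop.eq_def, pvListLoop.eq_def]
    by_cases hc : d * d ≤ number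
    · have hdn : d ≤ number := by nlinarith [sq_nonneg d, sq_nonneg (d - 1)]
      rw [if_pos hc, if_pos hc, ih _ (by omega) number (d + 1) _ rfl,
        pvArr_inner, pvArr_step]
    · rw [if_neg hc, if_neg hc]

theorem pvListLoop_length : ∀ (n : Nat) (number d : Int) (l : List Int),
    (number + 1 - d).toNat = n →
    (pvListLoop number d l).length = l.length := by
  intro n
  induction n using Nat.strong_induction_on with
  | _ n ih =>
    intro number d l hn
    rw [pvListLoop.eq_def]
    by_cases hc : d * d ≤ number
    · have hdn : d ≤ number := by nlinarith [sq_nonneg d, sq_nonneg (d - 1)]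
      rw [if_pos hc, ih _ (by omega) number (d + 1) _ rfl,
        pvBump_foldl_length, List.length_set]
    · rw [if_neg hc]

-- the B-sieve slot t accumulates 2 per small divisor and 1 if t is a square
theorem pvLoop_getD : ∀ (n : Nat) (number d : Int) (l : List Int) (t : Nat),
    (number + 1 - d).toNat = n → 1 ≤ d → (t : Int) ≤ number → t < l.length →
    (pvListLoop number d l).getD t 0 = l.getD t 0
      + 2 * ((PySem.List.pyRange 1 (number + 1) 1).countP
          (fun e => decide (e ∣ (t : Int) ∧ e * e < (t : Int)) && decide (d ≤ e)) : Int)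
      + ((PySem.List.pyRange 1 (number + 1) 1).countP
          (fun e => decide (e * e = (t : Int)) && decide (d ≤ e)) : Int) := by
  intro n
  induction n using Nat.strong_induction_on with
  | _ n ih =>
    intro number d l t hn hd ht hlen
    rw [pvListLoop.eq_def]
    by_cases hc : d * d ≤ number
    · have hdn : d ≤ number := by nlinarith [sq_nonneg d, sq_nonneg (d - 1)]
      rw [if_pos hc]
      have hlen1 : t < (l.set (d * d).toNat (l.getD (d * d).toNat 0 + 1)).length := by
        simpa [List.length_set] using hlen
      have hlen2 : t < ((PySem.List.pyRange (d * d + d) (number + 1) d).foldl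
          (fun cl m => cl.set m.toNat (cl.getD m.toNat 0 + 2))
          (l.set (d * d).toNat (l.getD (d * d).toNat 0 + 1))).length := by
        rw [pvBump_foldl_length]
        exact hlen1
      rw [ih _ (by omega) number (d + 1) _ t rfl (by omega) ht hlen2]
      rw [pvBump_foldl_getD 2 _ _ t hlen1 (fun j hj => by
        have := (PySem.List.mem_pyRange_iff_of_pos (by omega : (0:Int) < d) j).mp hj
        nlinarith [this.1])]
      rw [show (l.set (d * d).toNat (l.getD (d * d).toNat 0 + 1))
          = [((d * d : Int))].foldl (fun cl j => cl.set j.toNat (cl.getD j.toNat 0 + 1)) l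
        from rfl]
      rw [pvBump_foldl_getD 1 _ _ t hlen (fun j hj => by
        simp only [List.mem_singleton] at hj
        subst hj
        positivity)]
      rw [pvCount_pairs d (number + 1) (t : Int) hd]
      have hScount : ((PySem.List.pyRange 1 (number + 1) 1).countP
            (fun e => decide (e ∣ (t : Int) ∧ e * e < (t : Int)) && decide (d ≤ e)) : Int)
          = ((PySem.List.pyRange 1 (number + 1) 1).countP
            (fun e => decide (e ∣ (t : Int) ∧ e * e < (t : Int)) && decide (d + 1 ≤ e)) : Int)
          + (if (decide ((d : Int) ∣ (t : Int) ∧ d * d < (t : Int))) = true then 1 else 0) := by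
        rw [pvCountP_shift _ (PySem.List.nodup_pyRange_one _ _) _ d (fun hp => by
          simp only [decide_eq_true_eq] at hp
          exact PySem.List.mem_pyRange_one.mpr ⟨by omega, by omega⟩)]
        split_ifs <;> push_cast <;> ring
      have hQcount : ((PySem.List.pyRange 1 (number + 1) 1).countP
            (fun e => decide (e * e = (t : Int)) && decide (d ≤ e)) : Int)
          = ((PySem.List.pyRange 1 (number + 1) 1).countP
            (fun e => decide (e * e = (t : Int)) && decide (d + 1 ≤ e)) : Int)
          + (if (decide (d * d = (t : Int))) = true then 1 else 0) := by
        rw [pvCountP_shift _ (PySem.List.nodup_pyRange_one _ _) _ d (fun hp => by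
          simp only [decide_eq_true_eq] at hp
          exact PySem.List.mem_pyRange_one.mpr ⟨by omega, by nlinarith⟩)]
        split_ifs <;> push_cast <;> ring
      rw [hScount, hQcount]
      have hsingle : (([((d * d : Int))] : List Int).count ((t : Int)) : Int)
          = if d * d = (t : Int) then 1 else 0 := by
        by_cases h : d * d = (t : Int) <;> simp [List.count_cons, h, eq_comm]
      rw [hsingle]
      by_cases h1 : (d : Int) ∣ (t : Int) <;> by_cases h2 : d * d < (t : Int) <;>
        by_cases h3 : d * d = (t : Int) <;>
        simp [h1, h2, h3, (by omega : (t : Int) < number + 1)] <;> ring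
    · rw [if_neg hc]
      have hS0 : (PySem.List.pyRange 1 (number + 1) 1).countP
          (fun e => decide (e ∣ (t : Int) ∧ e * e < (t : Int)) && decide (d ≤ e)) = 0 := by
        rw [List.countP_eq_zero]
        intro e he
        simp only [Bool.and_eq_true, decide_eq_true_eq]
        rintro ⟨⟨_, h2⟩, h3⟩
        nlinarith
      have hQ0 : (PySem.List.pyRange 1 (number + 1) 1).countP
          (fun e => decide (e * e = (t : Int)) && decide (d ≤ e)) = 0 := by
        rw [List.countP_eq_zero]
        intro e he
        simp only [Bool.and_eq_true, decide_eq_true_eq]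
        rintro ⟨h1, h2⟩
        nlinarith
      rw [hS0, hQ0]
      simp

-- restricting S and Q counts from range(1, number+1) to range(1, t+1)
theorem pvS_restrict (number t : Int) (h1 : 1 ≤ t) (h2 : t ≤ number) :
    (PySem.List.pyRange 1 (number + 1) 1).countP
      (fun e => decide (e ∣ t ∧ e * e < t) && decide (1 ≤ e)) = pvS t 1 := by
  unfold pvS
  rw [PySem.List.pyRange_one_append 1 (t + 1) (number + 1) (by omega) (by omega),
    List.countP_append]
  have hzero : (PySem.List.pyRange (t + 1) (number + 1) 1).countP
      (fun e => decide (e ∣ t ∧ e * e < t) && decide (1 ≤ e)) = 0 := by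
    rw [List.countP_eq_zero]
    intro e he
    have hmem := PySem.List.mem_pyRange_one.mp he
    simp only [Bool.and_eq_true, decide_eq_true_eq]
    rintro ⟨⟨_, h⟩, _⟩
    nlinarith [hmem.1]
  rw [hzero, Nat.add_zero]

theorem pvQ_restrict (number t : Int) (h1 : 1 ≤ t) (h2 : t ≤ number) :
    (PySem.List.pyRange 1 (number + 1) 1).countP
      (fun e => decide (e * e = t) && decide (1 ≤ e)) = pvQ t 1 := by
  unfold pvQ
  rw [PySem.List.pyRange_one_append 1 (t + 1) (number + 1) (by omega) (by omega),
    List.countP_append]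
  have hzero : (PySem.List.pyRange (t + 1) (number + 1) 1).countP
      (fun e => decide (e * e = t) && decide (1 ≤ e)) = 0 := by
    rw [List.countP_eq_zero]
    intro e he
    have hmem := PySem.List.mem_pyRange_one.mp he
    simp only [Bool.and_eq_true, decide_eq_true_eq]
    rintro ⟨h, _⟩
    nlinarith [hmem.1]
  rw [hzero, Nat.add_zero]

-- A's divisor-count predicate over range(1, number+1) is pvM t 1
theorem pvA_to_pvM (number t : Int) (h1 : 1 ≤ t) (h2 : t ≤ number) :
    (PySem.List.pyRange 1 (number + 1) 1).countP
      (fun i => decide (i ≤ t ∧ t < number + 1 ∧ i ∣ t)) = pvM t 1 := by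
  unfold pvM
  rw [PySem.List.pyRange_one_append 1 (t + 1) (number + 1) (by omega) (by omega),
    List.countP_append]
  have hzero : (PySem.List.pyRange (t + 1) (number + 1) 1).countP
      (fun i => decide (i ≤ t ∧ t < number + 1 ∧ i ∣ t)) = 0 := by
    rw [List.countP_eq_zero]
    intro i hi
    have := (PySem.List.mem_pyRange_one.mp hi).1
    simp only [decide_eq_true_eq]
    omega
  rw [hzero, Nat.add_zero]
  apply List.countP_congr
  intro e he
  have hmem := PySem.List.mem_pyRange_one.mp he
  simp only [decide_eq_true_eq]
  constructor
  · rintro ⟨hle, _, hdvd⟩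
    exact ⟨hdvd, hmem.1, by omega⟩
  · rintro ⟨hdvd, _, _⟩
    exact ⟨by omega, by omega, hdvd⟩

-- ===== VERDICT (by name: the statement is the Claim_ definition above) =====
theorem solution_spec : Claim_equal_solution := by
  intro number limit power _
  simp only [Spec_solution, solution, solution_alt]
  rw [← Array.foldl_toList, ← Array.foldl_toList, pvArr_outer, Array.toList_replicate,
    pvLoop_toList (number + 1 - 1).toNat number 1 _ rfl, Array.toList_replicate]
  congr 1
  by_cases hn : number < 0
  · have h1 : number + 1 ≤ 1 := by omega
    have h0 : (number + 1).toNat = 0 := by omega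
    rw [pvListLoop.eq_def, if_neg (by nlinarith)]
    simp [PySem.List.pyRange_one_eq_nil h1, h0]
  · push_neg at hn
    apply List.ext_getElem
    · rw [pvListLoop_length (number + 1 - 1).toNat number 1 _ rfl]
      rw [show (PySem.List.pyRange 1 (number + 1) 1).foldl
          (fun cl i =>
            (PySem.List.pyRange i (number + 1) i).foldl
              (fun cl j => cl.set j.toNat (cl.getD j.toNat 0 + 1)) cl)
          (List.replicate (number + 1).toNat (0 : Int))
        = (((PySem.List.pyRange 1 (number + 1) 1).map
              (fun i => PySem.List.pyRange i (number + 1) i)).flatten).foldl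
            (fun cl j => cl.set j.toNat (cl.getD j.toNat 0 + 1))
            (List.replicate (number + 1).toNat (0 : Int)) from by
          rw [List.foldl_flatten, List.foldl_map]]
      rw [pvBump_foldl_length, List.length_replicate]
    · intro t hA hB
      have hAlen : t < (number + 1).toNat := by
        rw [show (PySem.List.pyRange 1 (number + 1) 1).foldl
            (fun cl i =>
              (PySem.List.pyRange i (number + 1) i).foldl
                (fun cl j => cl.set j.toNat (cl.getD j.toNat 0 + 1)) cl)
            (List.replicate (number + 1).toNat (0 : Int))
          = (((PySem.List.pyRange 1 (number + 1) 1).map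
                (fun i => PySem.List.pyRange i (number + 1) i)).flatten).foldl
              (fun cl j => cl.set j.toNat (cl.getD j.toNat 0 + 1))
              (List.replicate (number + 1).toNat (0 : Int)) from by
            rw [List.foldl_flatten, List.foldl_map]] at hA
        rw [pvBump_foldl_length, List.length_replicate] at hA
        exact hA
      rw [← List.getD_eq_getElem _ 0 hA, ← List.getD_eq_getElem _ 0 hB]
      rw [pvSieve_getD number t hAlen]
      rw [pvLoop_getD (number + 1 - 1).toNat number 1 _ t rfl le_rfl (by omega)
        (by simpa using hAlen)]
      rw [List.getD_replicate _ hAlen]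
      by_cases ht0 : t = 0
      · subst ht0
        have hA0 : (PySem.List.pyRange 1 (number + 1) 1).countP
            (fun i => decide (i ≤ ((0:Nat) : Int) ∧ ((0:Nat) : Int) < number + 1 ∧ i ∣ ((0:Nat) : Int))) = 0 := by
          rw [List.countP_eq_zero]
          intro i hi
          have := (PySem.List.mem_pyRange_one.mp hi).1
          simp only [decide_eq_true_eq]
          omega
        have hS0 : (PySem.List.pyRange 1 (number + 1) 1).countP
            (fun e => decide (e ∣ ((0:Nat) : Int) ∧ e * e < ((0:Nat) : Int)) && decide (1 ≤ e)) = 0 := by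
          rw [List.countP_eq_zero]
          intro e he
          have := (PySem.List.mem_pyRange_one.mp he).1
          simp only [Bool.and_eq_true, decide_eq_true_eq]
          rintro ⟨⟨_, h⟩, _⟩
          push_cast at h
          nlinarith [mul_le_mul_of_nonneg_left this (by linarith : (0:Int) ≤ e)]
        have hQ0 : (PySem.List.pyRange 1 (number + 1) 1).countP
            (fun e => decide (e * e = ((0:Nat) : Int)) && decide (1 ≤ e)) = 0 := by
          rw [List.countP_eq_zero]
          intro e he
          have := (PySem.List.mem_pyRange_one.mp he).1
          simp only [Bool.and_eq_true, decide_eq_true_eq]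
          rintro ⟨h, _⟩
          push_cast at h
          nlinarith [mul_le_mul_of_nonneg_left this (by linarith : (0:Int) ≤ e)]
        rw [hA0, hS0, hQ0]
        simp
      · have ht1 : 1 ≤ ((t : Nat) : Int) := by omega
        have ht2 : ((t : Nat) : Int) ≤ number := by omega
        rw [pvA_to_pvM number (t : Int) ht1 ht2,
          pvM_pairing ((t : Int) - 1).toNat (t : Int) 1 ht1 le_rfl rfl,
          pvS_restrict number (t : Int) ht1 ht2, pvQ_restrict number (t : Int) ht1 ht2]
        ring
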